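-- pv_equiv track=rewrite | github.com/v-song/image-process | ppm-process.py | remove_color
-- ===== SOURCE A (Python) =====
-- def remove_color(line, color):
--     """
--     This function takes a parameter line (guaranteed to be a string of integers between 0 and 255 inclusive) and a color
--     (must be red, green, or blue). The function sets the respective r, g, b values to 0 based on the color specified in
--     the parameter.
--
--     :param line: a string with integers of values between 0 and 255 inclusive. The number of integers is a multiple of 3 (str)
--     :param color: red, green, or blue (str)
--     :return: a string with the same number of integers as in line, but with the respective r, g, b values replaced with 0 (str)
--     """
--     # turns line from a string into a list
--     make_line = line.split()
--     string = ""
--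
--     # if color is red, sets the first integer in every group of three to 0
--     if color == "red":
--         for i in range(0, len(make_line), 3):
--             make_line[i] = "0"
--     # if color is green, sets the second integer in every group of three to 0
--     elif color == "green":
--         for i in range(1, len(make_line), 3):
--             make_line[i] = "0"
--     # if color is blue, sets the third integer in every group of three to 0
--     elif color == "blue":
--         for i in range(2, len(make_line), 3):
--             make_line[i] = "0"
--
--     # loops through make_line and adds every value to a string
--     for i in range (0, len(make_line)):
--         string += make_line[i] + " "
--
--     # returns the new string with modified r, g, b after removing excess space in the string by using rstrip
--     return string.rstrip(" ")
-- ===== SOURCE B (Python) =====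
-- def remove_color(line, color):
--     offset = {"red": 0, "green": 1, "blue": 2}.get(color)
--     nums = line.split()
--     if offset is None:
--         return " ".join(nums)
--     pixels = [nums[i:i + 3] for i in range(0, len(nums), 3)]
--     for p in pixels:
--         if len(p) > offset:
--             p[offset] = "0"
--     return " ".join(t for p in pixels for t in p)
-- ===== Notes on version B (the rewrite author's own statement) =====
-- stated objective: alternative
-- what changed: B looks the channel offset up in a dict, regroups the split tokens into per-pixel triples and zeroes one column of the triples, then ' '.join's the flattened tokens, instead of A's three stepped index loops over the flat list plus a concatenate-every-token-with-a-trailing-space-then-rstrip finish.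
import Mathlib
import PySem

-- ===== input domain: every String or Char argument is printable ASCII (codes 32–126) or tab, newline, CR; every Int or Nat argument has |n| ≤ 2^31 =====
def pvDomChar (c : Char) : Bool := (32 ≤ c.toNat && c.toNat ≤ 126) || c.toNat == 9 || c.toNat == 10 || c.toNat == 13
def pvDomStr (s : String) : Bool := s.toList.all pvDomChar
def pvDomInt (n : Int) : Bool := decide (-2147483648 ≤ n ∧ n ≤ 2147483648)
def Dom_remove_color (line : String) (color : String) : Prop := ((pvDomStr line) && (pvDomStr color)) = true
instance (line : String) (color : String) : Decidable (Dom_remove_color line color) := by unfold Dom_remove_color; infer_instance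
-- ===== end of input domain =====

-- B regroups the token list into per-pixel triples and zeroes one column (found by a dict lookup),
-- instead of A's three stepped index loops plus a trailing-space concatenation; objective: alternative decomposition.


-- ===== PORT A =====
-- exact port of Python's s.rstrip(" "): drop the trailing ' ' characters (PySem has no rstrip-with-chars form)
def pvRstripSpace (s : String) : String :=
  String.ofList ((s.toList.reverse.dropWhile (fun c => c == ' ')).reverse)

-- one stepped `for i in range(off, len(make_line), 3): make_line[i] = "0"` loop of A;
-- every produced index is a valid non-negative position, so `make_line[i] = "0"` is List.set at i.toNat
def pvZeroLoop (make_line : List String) (off : Int) : List String :=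
  (PySem.List.pyRange off (PySem.List.len make_line) 3).foldl (fun l i => l.set i.toNat "0") make_line

def remove_color (line : String) (color : String) : String :=
  let make_line := PySem.Str.split₀ line
  let make_line :=
    if color == "red" then pvZeroLoop make_line 0
    else if color == "green" then pvZeroLoop make_line 1
    else if color == "blue" then pvZeroLoop make_line 2
    else make_line
  -- `for i in range(0, len(make_line)): string += make_line[i] + " "`; i is always in range, so
  -- make_line[i] is PySem.List.pyGetD with an arbitrary default
  let string := (PySem.List.pyRange 0 (PySem.List.len make_line)).foldl
      (fun s i => s ++ PySem.List.pyGetD make_line i "" ++ " ") ""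
  pvRstripSpace string

-- ===== PORT B =====
def remove_color_alt (line : String) (color : String) : String :=
  let offset? := (PySem.Dict.mk [("red", (0 : Nat)), ("green", 1), ("blue", 2)]).get? color
  let nums := PySem.Str.split₀ line
  match offset? with
  | none => PySem.Str.join " " nums
  | some off =>
    let pixels := (PySem.List.pyRange 0 (PySem.List.len nums) 3).map
        (fun i => PySem.List.slice nums (some i) (some (i + 3)))
    let pixels := pixels.map (fun p => if off < p.length then p.set off "0" else p)
    PySem.Str.join " " pixels.flatten

-- ===== PRECONDITION & SPEC =====
def Spec_remove_color (line : String) (color : String) (out : String) : Prop := out = remove_color_alt line color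
instance (line : String) (color : String) (out : String) : Decidable (Spec_remove_color line color out) := by unfold Spec_remove_color; infer_instance

-- ===== CLAIM (what is proved, stated in full; the proofs are below) =====
def Claim_equal_remove_color : Prop := ∀ (line : String) (color : String), Dom_remove_color line color → Spec_remove_color line color (remove_color line color)

-- ===== LEMMAS AND PROOFS =====

-- split() produces only "good" tokens: non-empty and free of whitespace characters
theorem pvSplit_go_good (s : List Char) : ∀ (cur : List Char) (acc : List (List Char)),
    (∀ t ∈ acc, t ≠ [] ∧ ∀ c ∈ t, PySem.Chars.isspace c = false) →
    (∀ c ∈ cur, PySem.Chars.isspace c = false) →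
    ∀ t ∈ PySem.Chars.split₀.go s cur acc, t ≠ [] ∧ ∀ c ∈ t, PySem.Chars.isspace c = false := by
  induction s with
  | nil =>
    intro cur acc hacc hcur t ht
    rw [PySem.Chars.split₀.go.eq_def] at ht; dsimp only [] at ht
    by_cases hc : cur.isEmpty = true
    · rw [if_pos hc] at ht
      exact hacc t (by simpa using ht)
    · rw [if_neg hc] at ht
      simp at ht
      rcases ht with h | h
      · exact hacc t h
      · subst h
        refine ⟨by simpa using (List.isEmpty_eq_false_iff.mp (by simpa using hc)), ?_⟩
        intro c hcmem
        exact hcur c (by simpa using hcmem)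
  | cons c rest ih =>
    intro cur acc hacc hcur t ht
    rw [PySem.Chars.split₀.go.eq_def] at ht; dsimp only [] at ht
    by_cases hs : PySem.Chars.isspace c = true
    · rw [if_pos hs] at ht
      by_cases hc : cur.isEmpty = true
      · rw [if_pos hc] at ht
        exact ih [] acc hacc (by simp) t ht
      · rw [if_neg hc] at ht
        refine ih [] _ ?_ (by simp) t ht
        intro u hu
        rcases List.mem_cons.mp hu with h | h
        · subst h
          refine ⟨by simpa using (List.isEmpty_eq_false_iff.mp (by simpa using hc)), ?_⟩
          intro d hd
          exact hcur d (by simpa using hd)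
        · exact hacc u h
    · rw [if_neg hs] at ht
      refine ih (c :: cur) acc hacc ?_ t ht
      intro d hd
      rcases List.mem_cons.mp hd with h | h
      · subst h; simpa using hs
      · exact hcur d h

theorem pvSplit_good (line : String) : ∀ t ∈ PySem.Str.split₀ line,
    t.toList ≠ [] ∧ ∀ c ∈ t.toList, PySem.Chars.isspace c = false := by
  intro t ht
  have h : t.toList ∈ PySem.Chars.split₀ line.toList := by
    rw [← PySem.Str.split₀_map_toList]
    exact List.mem_map_of_mem ht
  exact pvSplit_go_good _ _ _ (by simp) (by simp) _ h

-- the element-wise description of A's stepped set-loop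
theorem pvFoldlSet_getElem (idxs : List Int) : ∀ (S : List String), (∀ i ∈ idxs, 0 ≤ i) →
    (idxs.foldl (fun l i => l.set i.toNat "0") S).length = S.length ∧
    ∀ j : Nat, (idxs.foldl (fun l i => l.set i.toNat "0") S)[j]? =
      if (j : Int) ∈ idxs ∧ j < S.length then some "0" else S[j]? := by
  induction idxs with
  | nil => intro S h; simp
  | cons i rest ih =>
    intro S h
    have hi : 0 ≤ i := h i (by simp)
    obtain ⟨hlen, hget⟩ := ih (S.set i.toNat "0") (fun x hx => h x (by simp [hx]))
    simp only [List.foldl_cons]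
    refine ⟨by simp [hlen], ?_⟩
    intro j
    rw [hget j]
    rw [List.getElem?_set]
    have hcast : ((j : Int) = i) ↔ (i.toNat = j) := by omega
    by_cases hji : (j : Int) ∈ rest
    · simp only [hji, List.mem_cons, or_true, true_and, List.length_set]
      split_ifs <;>
        first
          | rfl
          | omega
          | (exact (List.getElem?_eq_none (by omega)).symm)
    · simp only [List.length_set]
      by_cases heq : i.toNat = j
      · have : (j : Int) = i := by omega
        by_cases hjl : j < S.length
        · simp [heq, hjl, this]
        · simp [heq, hjl, this]
      · have : ¬ ((j : Int) = i) := by omega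
        simp [hji, heq, this]

theorem pvMemRange3 (off n j : Nat) (hoff : off < 3) :
    ((j : Int) ∈ PySem.List.pyRange off n 3) ↔ (j < n ∧ j % 3 = off) := by
  rw [PySem.List.pyRange_of_pos _ _ (by norm_num)]
  simp only [List.mem_map, List.mem_range]
  constructor
  · rintro ⟨k, hk, hkj⟩
    split_ifs at hk with h
    · have : (off : Int) < n := by exact_mod_cast h
      have hK : (k : Int) < ((n : Int) - off + 3 - 1) / 3 := by
        omega
      constructor
      · omega
      · omega
    · omega
  · rintro ⟨hjn, hjm⟩
    refine ⟨(j - off) / 3, ?_, ?_⟩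
    · have h : (off : Int) < n := by omega
      rw [if_pos h]
      omega
    · omega

-- B's pixel list is the 3-chunking of the token list
def pvChunk3 (S : List String) : List (List String) :=
  match S with
  | [] => []
  | a :: rest => ((a :: rest).take 3) :: pvChunk3 ((a :: rest).drop 3)
  termination_by S.length
  decreasing_by simp

theorem pvChunk3_cons (a : String) (rest : List String) :
    pvChunk3 (a :: rest) = ((a :: rest).take 3) :: pvChunk3 ((a :: rest).drop 3) := by
  rw [pvChunk3]

theorem pvPixels_eq_chunk3 (n : Nat) : ∀ (S : List String), S.length = n →
    (PySem.List.pyRange 0 (PySem.List.len S) 3).map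
        (fun i => PySem.List.slice S (some i) (some (i + 3))) = pvChunk3 S := by
  induction n using Nat.strong_induction_on with
  | _ n ih =>
    intro S hn
    match S with
    | [] => simp [PySem.List.pyRange_of_pos 0 0 (by norm_num : (0:ℤ) < 3), PySem.List.len, pvChunk3]
    | a :: rest =>
      have hr : (a :: rest).length = rest.length + 1 := by simp
      have hnr : n = rest.length + 1 := by omega
      rw [pvChunk3_cons]
      rw [PySem.List.pyRange_of_pos 0 _ (by norm_num : (0:ℤ) < 3)]
      have hlen : PySem.List.len (a :: rest) = ((rest.length + 1 : ℕ) : Int) := by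
        simp [PySem.List.len]
      rw [hlen]
      rw [if_pos (by push_cast; omega)]
      have hK : ((((rest.length + 1 : ℕ) : Int)) - 0 + 3 - 1) / 3 = (((rest.length + 1 - 3 + 2) / 3 + 1 : ℕ) : Int) := by
        omega
      rw [hK, Int.toNat_natCast]
      rw [List.range_succ_eq_map]
      simp only [List.map_cons, List.map_map]
      congr 1
      · have := PySem.List.slice_natCast_add (a :: rest) 0 3
        simpa using this
      · have hdl : ((a :: rest).drop 3).length = rest.length + 1 - 3 := by simp
        have hrec := ih ((a :: rest).drop 3).length (by omega) ((a :: rest).drop 3) rfl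
        rw [← hrec]
        rw [PySem.List.pyRange_of_pos 0 _ (by norm_num : (0:ℤ) < 3)]
        have hlen2 : PySem.List.len ((a :: rest).drop 3) = ((rest.length + 1 - 3 : ℕ) : Int) := by
          simp [PySem.List.len]
        rw [hlen2]
        by_cases h3 : 3 < rest.length + 1
        · rw [if_pos (by push_cast; omega)]
          have hK2 : ((((rest.length + 1 - 3 : ℕ) : Int)) - 0 + 3 - 1) / 3 = (((rest.length + 1 - 3 + 2) / 3 : ℕ) : Int) := by
            omega
          rw [hK2, Int.toNat_natCast]
          simp only [List.map_map]
          apply List.map_congr_left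
          intro k hk
          simp only [Function.comp_apply]
          have e1 : ((0 : ℤ) + 3 * ((k + 1 : ℕ) : Int)) = ((3 + 3 * k : ℕ) : Int) := by push_cast; ring
          have e3 : ((0 : ℤ) + 3 * ((k : ℕ) : Int)) = (((3 * k : ℕ) : Int)) := by push_cast; ring
          rw [e1, e3]
          have h1 := PySem.List.slice_natCast_add (a :: rest) (3 + 3 * k) 3
          have h2 := PySem.List.slice_natCast_add ((a :: rest).drop 3) (3 * k) 3
          rw [show (((3 + 3 * k : ℕ) : Int) + 3) = ((3 + 3 * k : ℕ) : Int) + ((3:ℕ) : Int) by push_cast; ring] at *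
          rw [h1]
          rw [show ((((3 * k : ℕ)) : Int) + 3) = (((3 * k : ℕ)) : Int) + ((3:ℕ) : Int) by norm_num]
          rw [h2]
          rw [List.drop_drop]
        · have h0 : rest.length + 1 - 3 = 0 := by omega
          rw [h0]
          norm_num

-- the element-wise description of B's flattened, column-zeroed chunk list
theorem pvChunkZero_getElem (off : Nat) (hoff : off < 3) (n : Nat) : ∀ (S : List String), S.length = n →
    ((pvChunk3 S).map (fun p => if off < p.length then p.set off "0" else p)).flatten.length = S.length ∧
    ∀ j : Nat, ((pvChunk3 S).map (fun p => if off < p.length then p.set off "0" else p)).flatten[j]? =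
      if j < S.length ∧ j % 3 = off then some "0" else S[j]? := by
  induction n using Nat.strong_induction_on with
  | _ n ih =>
    intro S hn
    match S with
    | [] => simp [pvChunk3]
    | a :: rest =>
      have hr : (a :: rest).length = rest.length + 1 := by simp
      rw [pvChunk3_cons]
      simp only [List.map_cons, List.flatten_cons]
      have hdl : ((a :: rest).drop 3).length = rest.length + 1 - 3 := by simp
      obtain ⟨ihl, ihg⟩ := ih ((a :: rest).drop 3).length (by omega) ((a :: rest).drop 3) rfl
      have htl : ((a :: rest).take 3).length = min 3 (rest.length + 1) := by simp; omega
      have hpl : (if off < ((a :: rest).take 3).length then ((a :: rest).take 3).set off "0" else (a :: rest).take 3).length = min 3 (rest.length + 1) := by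
        split_ifs <;> (simp; omega)
      constructor
      · rw [List.length_append, hpl, ihl, hdl, hr]
        omega
      · intro j
        rw [List.getElem?_append]
        rw [hpl]
        by_cases hj : j < min 3 (rest.length + 1)
        · rw [if_pos hj]
          have hj3 : j < 3 := by omega
          have hjlen : j < rest.length + 1 := by omega
          have hjm : j % 3 = j := by omega
          by_cases hguard : off < ((a :: rest).take 3).length
          · rw [if_pos hguard]
            rw [List.getElem?_set]
            rw [List.getElem?_take]
            rw [if_pos hj3]
            by_cases hoj : off = j
            · subst hoj
              rw [if_pos rfl]
              rw [htl] at hguard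
              rw [htl, if_pos hguard, hr, if_pos ⟨hjlen, hjm⟩]
            · rw [if_neg hoj]
              rw [hr]
              have : ¬ (j < rest.length + 1 ∧ j % 3 = off) := by omega
              rw [if_neg this]
          · rw [if_neg hguard]
            rw [htl] at hguard
            have hoj : ¬ (j % 3 = off) := by omega
            rw [List.getElem?_take, if_pos hj3, hr]
            rw [if_neg (by omega : ¬ (j < rest.length + 1 ∧ j % 3 = off))]
        · rw [if_neg hj]
          rw [ihg (j - min 3 (rest.length + 1))]
          by_cases h3 : rest.length + 1 ≤ 3
          · have hde : (a :: rest).drop 3 = [] := by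
              apply List.eq_nil_of_length_eq_zero
              omega
            rw [hde]
            simp only [List.length_nil]
            rw [if_neg (by omega : ¬ (j - min 3 (rest.length + 1) < 0 ∧ (j - min 3 (rest.length + 1)) % 3 = off))]
            have : ¬ (j < (a :: rest).length ∧ j % 3 = off) := by rw [hr]; omega
            rw [if_neg this]
            simp
            omega
          · have hmin3 : min 3 (rest.length + 1) = 3 := by omega
            rw [hmin3] at hj ⊢
            rw [hdl]
            rw [List.getElem?_drop]
            have hmod : (j - 3) % 3 = j % 3 := by omega
            rw [hmod]
            have hiff : ((j - 3 < rest.length + 1 - 3 ∧ j % 3 = off)) ↔ ((j < (a :: rest).length ∧ j % 3 = off)) := by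
              rw [hr]; omega
            have harg : 3 + (j - 3) = j := by omega
            rw [harg]
            by_cases hcond : j < (a :: rest).length ∧ j % 3 = off
            · rw [if_pos (hiff.mpr hcond), if_pos hcond]
            · rw [if_neg (fun h => hcond (hiff.mp h)), if_neg hcond]

theorem pvRange3_nonneg (off : Nat) (n : Int) : ∀ i ∈ PySem.List.pyRange (off : Int) n 3, 0 ≤ i := by
  intro i hi
  have := PySem.List.mem_pyRange_of_pos (by norm_num : (0:ℤ) < 3) hi
  omega

-- hence the two modified token lists coincide
theorem pvLists_eq (off : Nat) (hoff : off < 3) (S : List String) :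
    pvZeroLoop S (off : Int) =
    ((pvChunk3 S).map (fun p => if off < p.length then p.set off "0" else p)).flatten := by
  obtain ⟨hal, hag⟩ := pvFoldlSet_getElem (PySem.List.pyRange (off : Int) (PySem.List.len S) 3) S
      (pvRange3_nonneg off _)
  obtain ⟨hbl, hbg⟩ := pvChunkZero_getElem off hoff S.length S rfl
  apply List.ext_getElem?
  intro j
  rw [pvZeroLoop, hag j, hbg j]
  have hlen : PySem.List.len S = ((S.length : ℕ) : Int) := by simp [PySem.List.len]
  rw [hlen]
  simp only [pvMemRange3 off S.length j hoff]
  by_cases h : j < S.length ∧ j % 3 = off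
  · rw [if_pos ⟨⟨h.1, h.2⟩, h.1⟩, if_pos h]
  · have : ¬ ((j < S.length ∧ j % 3 = off) ∧ j < S.length) := by tauto
    rw [if_neg this, if_neg h]

-- the set-loop only produces good tokens (each entry is an original token or "0")
theorem pvLists_good (off : Nat) (S : List String)
    (hS : ∀ t ∈ S, t.toList ≠ [] ∧ ∀ c ∈ t.toList, PySem.Chars.isspace c = false) :
    ∀ t ∈ pvZeroLoop S (off : Int), t.toList ≠ [] ∧ ∀ c ∈ t.toList, PySem.Chars.isspace c = false := by
  intro t ht
  obtain ⟨hal, hag⟩ := pvFoldlSet_getElem (PySem.List.pyRange (off : Int) (PySem.List.len S) 3) S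
      (pvRange3_nonneg off _)
  rw [List.mem_iff_getElem?] at ht
  obtain ⟨j, hj⟩ := ht
  rw [pvZeroLoop] at hj
  rw [hag j] at hj
  split_ifs at hj with h
  · cases hj
    constructor
    · simp
    · intro c hc
      simp at hc
      subst hc
      decide
  · exact hS t (List.mem_iff_getElem?.mpr ⟨j, hj⟩)

-- char-level: the trailing-space fold, and rstrip-vs-join
theorem pvFoldTrail (L : List (List Char)) : ∀ (acc : List Char),
    L.foldl (fun s t => s ++ t ++ [' ']) acc = acc ++ (L.map (fun t => t ++ [' '])).flatten := by
  induction L with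
  | nil => intro acc; simp
  | cons t rest ih =>
    intro acc
    simp only [List.foldl_cons, List.map_cons, List.flatten_cons]
    rw [ih]
    simp

theorem pvFlattenTrail (L : List (List Char)) (hL : L ≠ []) :
    (L.map (fun t => t ++ [' '])).flatten = PySem.Chars.join [' '] L ++ [' '] := by
  induction L with
  | nil => simp at hL
  | cons t rest ih =>
    match rest with
    | [] => simp [PySem.Chars.join_singleton]
    | u :: rest' =>
      simp only [List.map_cons, List.flatten_cons] at *
      rw [ih (by simp)]
      rw [PySem.Chars.join_cons_cons]
      simp

-- the reverse of a join of good tokens starts with a non-space character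
theorem pvJoinRevHead (L : List (List Char)) (hL : L ≠ [])
    (hG : ∀ t ∈ L, t ≠ [] ∧ ∀ c ∈ t, PySem.Chars.isspace c = false) :
    ∃ c m, (PySem.Chars.join [' '] L).reverse = c :: m ∧ (c == ' ') = false := by
  induction L with
  | nil => simp at hL
  | cons t rest ih =>
    match rest with
    | [] =>
      rw [PySem.Chars.join_singleton]
      obtain ⟨hne, hsp⟩ := hG t (by simp)
      obtain ⟨c, m, hcm⟩ : ∃ c m, t.reverse = c :: m :=
        List.exists_cons_of_ne_nil (by simpa using hne)
      refine ⟨c, m, hcm, ?_⟩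
      have hc : c ∈ t := by
        have : c ∈ t.reverse := by rw [hcm]; simp
        simpa using this
      have := hsp c hc
      have hcs : c ≠ ' ' := by
        intro hh
        subst hh
        simp [show PySem.Chars.isspace ' ' = true from by decide] at this
      simpa using hcs
    | u :: rest' =>
      obtain ⟨c, m, hcm, hcs⟩ := ih (by simp) (fun x hx => hG x (by simp [hx]))
      rw [PySem.Chars.join_cons_cons]
      refine ⟨c, m ++ (' ' :: t.reverse), ?_, hcs⟩
      rw [List.reverse_append, List.reverse_append]
      simp [hcm]

theorem pvStrFold (S : List String) : ∀ (acc : String),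
    (S.foldl (fun s t => s ++ t ++ " ") acc).toList =
      (S.map String.toList).foldl (fun s t => s ++ t ++ [' ']) acc.toList := by
  induction S with
  | nil => intro acc; simp
  | cons t rest ih =>
    intro acc
    simp only [List.foldl_cons, List.map_cons]
    rw [ih]
    congr 1
    simp

-- A's concatenate-then-rstrip equals B's " ".join on any list of good tokens
theorem pvJoinEq (S : List String)
    (hS : ∀ t ∈ S, t.toList ≠ [] ∧ ∀ c ∈ t.toList, PySem.Chars.isspace c = false) :
    pvRstripSpace ((PySem.List.pyRange 0 (PySem.List.len S)).foldl
        (fun s i => s ++ PySem.List.pyGetD S i "" ++ " ") "") = PySem.Str.join " " S := by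
  rw [PySem.List.foldl_pyRange_pyGetD S "" (fun s t => s ++ t ++ " ") "" (le_refl 0)]
  rw [show (0:ℤ).toNat = 0 from rfl, List.drop_zero]
  apply String.toList_injective
  rw [PySem.Str.toList_join, pvRstripSpace, String.toList_ofList]
  rw [pvStrFold]
  rw [pvFoldTrail]
  simp only [List.nil_append, String.toList_empty]
  match S with
  | [] => simp [PySem.Chars.join_nil]
  | a :: rest =>
    rw [pvFlattenTrail _ (by simp)]
    have hmap : ∀ t ∈ (a :: rest).map String.toList, t ≠ [] ∧ ∀ c ∈ t, PySem.Chars.isspace c = false := by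
      intro t ht
      simp only [List.mem_map] at ht
      obtain ⟨u, hu, rfl⟩ := ht
      exact hS u hu
    obtain ⟨c, m, hcm, hcs⟩ := pvJoinRevHead ((a :: rest).map String.toList) (by simp) hmap
    rw [List.reverse_append]
    rw [show ([' '] : List Char).reverse = [' '] from rfl]
    rw [List.singleton_append]
    rw [List.dropWhile_cons_of_pos (by decide)]
    rw [hcm]
    rw [List.dropWhile_cons_of_neg (by simp [hcs])]
    rw [← hcm, List.reverse_reverse]
    simp

-- one color branch of the main theorem
theorem pvBranch (line : String) (off : Nat) (hoff : off < 3) :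
    pvRstripSpace ((PySem.List.pyRange 0 (PySem.List.len (pvZeroLoop (PySem.Str.split₀ line) (off : Int)))).foldl
        (fun s i => s ++ PySem.List.pyGetD (pvZeroLoop (PySem.Str.split₀ line) (off : Int)) i "" ++ " ") "") =
    PySem.Str.join " "
      (((PySem.List.pyRange 0 (PySem.List.len (PySem.Str.split₀ line)) 3).map
          (fun i => PySem.List.slice (PySem.Str.split₀ line) (some i) (some (i + 3)))).map
        (fun p => if off < p.length then p.set off "0" else p)).flatten := by
  rw [pvJoinEq _ (pvLists_good off _ (pvSplit_good line))]
  rw [pvPixels_eq_chunk3 (PySem.Str.split₀ line).length _ rfl]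
  rw [pvLists_eq off hoff]

-- ===== VERDICT (by name: the statement is the Claim_ definition above) =====
theorem remove_color_spec : Claim_equal_remove_color := by
  intro line color _
  unfold Spec_remove_color remove_color remove_color_alt
  by_cases hred : color = "red"
  · subst hred
    simp only [beq_self_eq_true, if_true]
    rw [show (PySem.Dict.mk [("red", (0 : Nat)), ("green", 1), ("blue", 2)]).get? "red" = some 0 from by decide]
    exact_mod_cast pvBranch line 0 (by norm_num)
  · rw [show (color == "red") = false from by simp [hred]]
    simp only [Bool.false_eq_true, if_false]
    by_cases hgreen : color = "green"
    · subst hgreen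
      simp only [beq_self_eq_true, if_true]
      rw [show (PySem.Dict.mk [("red", (0 : Nat)), ("green", 1), ("blue", 2)]).get? "green" = some 1 from by decide]
      exact_mod_cast pvBranch line 1 (by norm_num)
    · rw [show (color == "green") = false from by simp [hgreen]]
      simp only [Bool.false_eq_true, if_false]
      by_cases hblue : color = "blue"
      · subst hblue
        simp only [beq_self_eq_true, if_true]
        rw [show (PySem.Dict.mk [("red", (0 : Nat)), ("green", 1), ("blue", 2)]).get? "blue" = some 2 from by decide]
        exact_mod_cast pvBranch line 2 (by norm_num)
      · rw [show (color == "blue") = false from by simp [hblue]]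
        simp only [Bool.false_eq_true, if_false]
        have hnone : (PySem.Dict.mk [("red", (0 : Nat)), ("green", 1), ("blue", 2)]).get? color = none := by
          rw [PySem.Dict.get?_eq_none_iff_not_mem_keys]
          intro hmem
          simp [PySem.Dict.keys] at hmem
          rcases hmem with h | h | h <;> simp_all
        rw [hnone]
        exact pvJoinEq _ (pvSplit_good line)
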